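-- pv_equiv track=rewrite | github.com/Alyndiar/GameManager | gamemanager/ui/main_window.py | _build_sort_chain
-- ===== SOURCE A (Python) =====
-- DEFAULT_RIGHT_SORT_CHAIN: list[tuple[str, bool]] = [
--     ("cleaned_name", True),
--     ("modified_at", False),
--     ("full_name", True),
--     ("created_at", False),
--     ("size_bytes", False),
--     ("source", True),
-- ]
--
-- def _build_sort_chain(primary_field: str, primary_ascending: bool) -> list[tuple[str, bool]]:
--     ordered = [(primary_field, primary_ascending)] + DEFAULT_RIGHT_SORT_CHAIN
--     seen: set[str] = set()
--     chain: list[tuple[str, bool]] = []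
--     for field, asc in ordered:
--         if field in seen:
--             continue
--         seen.add(field)
--         chain.append((field, asc))
--     return chain
-- ===== SOURCE B (Python) =====
-- DEFAULT_RIGHT_SORT_CHAIN: list[tuple[str, bool]] = [
--     ("cleaned_name", True),
--     ("modified_at", False),
--     ("full_name", True),
--     ("created_at", False),
--     ("size_bytes", False),
--     ("source", True),
-- ]
--
-- def _build_sort_chain(primary_field: str, primary_ascending: bool) -> list[tuple[str, bool]]:
--     # Default fields are pairwise distinct, so the only possible duplicate is a
--     # default entry whose field equals primary_field: filter it out directly.
--     return [(primary_field, primary_ascending)] + [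
--         (f, a) for f, a in DEFAULT_RIGHT_SORT_CHAIN if f != primary_field
--     ]
-- ===== Notes on version B (the rewrite author's own statement) =====
-- stated objective: simpler
-- what changed: Replaced the seen-set plus conditional-append accumulator loop by a direct filter: primary entry first, then the default chain with any entry matching primary_field dropped (valid because the default fields are pairwise distinct).
import Mathlib
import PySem

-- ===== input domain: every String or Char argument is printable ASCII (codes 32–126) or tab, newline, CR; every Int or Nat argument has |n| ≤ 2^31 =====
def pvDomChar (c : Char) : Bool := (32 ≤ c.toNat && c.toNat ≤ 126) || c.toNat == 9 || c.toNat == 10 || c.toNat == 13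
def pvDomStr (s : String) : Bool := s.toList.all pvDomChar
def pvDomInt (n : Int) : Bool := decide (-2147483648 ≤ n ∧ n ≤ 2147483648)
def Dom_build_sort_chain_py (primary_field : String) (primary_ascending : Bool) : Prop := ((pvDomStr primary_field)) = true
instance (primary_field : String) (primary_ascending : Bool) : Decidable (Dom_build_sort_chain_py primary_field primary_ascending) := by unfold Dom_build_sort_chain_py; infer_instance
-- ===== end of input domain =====

-- B replaces A's seen-set + conditional-append loop by a plain filter over the
-- default chain (whose fields are pairwise distinct); return value only, no side effects.
-- ===== PORT A =====
def pvDefaultChain : List (String × Bool) :=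
  [("cleaned_name", true), ("modified_at", false), ("full_name", true),
   ("created_at", false), ("size_bytes", false), ("source", true)]

def build_sort_chain_py (primary_field : String) (primary_ascending : Bool) : List (String × Bool) :=
  let ordered := [(primary_field, primary_ascending)] ++ pvDefaultChain
  let res := ordered.foldl
    (fun (st : PySem.Set String × List (String × Bool)) fa =>
      let (seen, chain) := st
      if PySem.Set.contains seen fa.1 then st
      else (PySem.Set.add seen fa.1, chain ++ [fa]))
    (PySem.Set.empty, [])
  res.2

-- ===== PORT B =====
def build_sort_chain_py_alt (primary_field : String) (primary_ascending : Bool) : List (String × Bool) :=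
  (primary_field, primary_ascending) :: pvDefaultChain.filter (fun fa => fa.1 != primary_field)

-- ===== PRECONDITION & SPEC =====
-- ===== PRECONDITION & SPEC =====
def Spec_build_sort_chain_py (primary_field : String) (primary_ascending : Bool) (out : List (String × Bool)) : Prop := out = build_sort_chain_py_alt primary_field primary_ascending
instance (primary_field : String) (primary_ascending : Bool) (out : List (String × Bool)) : Decidable (Spec_build_sort_chain_py primary_field primary_ascending out) := by unfold Spec_build_sort_chain_py; infer_instance

-- ===== CLAIM (what is proved, stated in full; the proofs are below) =====
def Claim_equal_build_sort_chain_py : Prop := ∀ (primary_field : String) (primary_ascending : Bool), Dom_build_sort_chain_py primary_field primary_ascending → Spec_build_sort_chain_py primary_field primary_ascending (build_sort_chain_py primary_field primary_ascending)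

-- ===== LEMMAS AND PROOFS =====
-- A's loop body as a named step function (definitionally what the port folds).
def pvStep (st : PySem.Set String × List (String × Bool)) (fa : String × Bool) :
    PySem.Set String × List (String × Bool) :=
  if PySem.Set.contains st.1 fa.1 then st
  else (PySem.Set.add st.1 fa.1, st.2 ++ [fa])

-- Loop invariant: if membership in `seen` coincides with equality to pf on every
-- field of l, and l's fields are pairwise distinct, the loop appends exactly
-- the entries whose field differs from pf.
theorem pvLoop_filter (pf : String) :
    ∀ (l : List (String × Bool)) (seen : PySem.Set String) (chain : List (String × Bool)),
      (∀ fa ∈ l, fa.1 ∈ seen ↔ fa.1 = pf) →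
      l.Pairwise (fun a b => a.1 ≠ b.1) →
      (l.foldl pvStep (seen, chain)).2 = chain ++ l.filter (fun fa => fa.1 != pf) := by
  intro l
  induction l with
  | nil => intro seen chain _ _; simp
  | cons fa t ih =>
    intro seen chain hseen hpw
    rw [List.pairwise_cons] at hpw
    by_cases h : fa.1 = pf
    · have hmem : fa.1 ∈ seen := (hseen fa (by simp)).mpr h
      rw [List.foldl_cons, show pvStep (seen, chain) fa = (seen, chain) by simp [pvStep, hmem],
        ih seen chain (fun g hg => hseen g (by simp [hg])) hpw.2]
      simp [h]
    · have hmem : fa.1 ∉ seen := fun m => h ((hseen fa (by simp)).mp m)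
      rw [List.foldl_cons,
        show pvStep (seen, chain) fa = (PySem.Set.add seen fa.1, chain ++ [fa])
          by simp [pvStep, hmem],
        ih (PySem.Set.add seen fa.1) (chain ++ [fa])
          (fun g hg => by
            have hne : g.1 ≠ fa.1 := fun e => hpw.1 g hg e.symm
            rw [PySem.Set.mem_add]
            constructor
            · rintro (hs | he)
              · exact (hseen g (by simp [hg])).mp hs
              · exact absurd he hne
            · intro he; exact Or.inl ((hseen g (by simp [hg])).mpr he))
          hpw.2]
      simp [h]

-- ===== VERDICT (by name: the statement is the Claim_ definition above) =====
theorem build_sort_chain_py_spec : Claim_equal_build_sort_chain_py := by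
  intro pf pa _
  unfold Spec_build_sort_chain_py build_sort_chain_py build_sort_chain_py_alt
  show (((pf, pa) :: pvDefaultChain).foldl pvStep (PySem.Set.empty, [])).2 = _
  rw [List.foldl_cons,
    show pvStep (PySem.Set.empty, []) (pf, pa) = (PySem.Set.add PySem.Set.empty pf, [(pf, pa)])
      by simp [pvStep, PySem.Set.empty],
    pvLoop_filter pf pvDefaultChain _ _
      (fun g _ => by simp [PySem.Set.empty])
      (by unfold pvDefaultChain; decide)]
  simp
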